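-- pv_equiv track=rewrite | github.com/hallucious/Nexa | src/engine/execution_debugger.py | _count_timeline_events
-- ===== SOURCE A (Python) =====
-- from typing import Any
--
-- def _count_timeline_events(timeline: list[dict[str, Any]]) -> dict[str, int]:
--     started = sum(1 for e in timeline if e.get("event") == "node_start")
--     finished = sum(1 for e in timeline if e.get("event") == "node_finish")
--     failed = sum(1 for e in timeline if e.get("event") == "node_failed")
--
--     return {
--         "nodes_started": started,
--         "nodes_finished": finished,
--         "nodes_failed": failed,
--     }
-- ===== SOURCE B (Python) =====
-- def _count_timeline_events(timeline: list) -> dict: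
--     counts = {}
--     for e in timeline:
--         k = e.get("event")
--         counts[k] = counts.get(k, 0) + 1
--     return {
--         "nodes_started": counts.get("node_start", 0),
--         "nodes_finished": counts.get("node_finish", 0),
--         "nodes_failed": counts.get("node_failed", 0),
--     }
-- ===== Notes on version B (the rewrite author's own statement) =====
-- stated objective: simpler
-- what changed: Replaces three independent filtering scans over the timeline by one pass that builds a counter dict keyed by the event name, then reads the three fixed keys out of it with default 0.
import Mathlib
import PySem

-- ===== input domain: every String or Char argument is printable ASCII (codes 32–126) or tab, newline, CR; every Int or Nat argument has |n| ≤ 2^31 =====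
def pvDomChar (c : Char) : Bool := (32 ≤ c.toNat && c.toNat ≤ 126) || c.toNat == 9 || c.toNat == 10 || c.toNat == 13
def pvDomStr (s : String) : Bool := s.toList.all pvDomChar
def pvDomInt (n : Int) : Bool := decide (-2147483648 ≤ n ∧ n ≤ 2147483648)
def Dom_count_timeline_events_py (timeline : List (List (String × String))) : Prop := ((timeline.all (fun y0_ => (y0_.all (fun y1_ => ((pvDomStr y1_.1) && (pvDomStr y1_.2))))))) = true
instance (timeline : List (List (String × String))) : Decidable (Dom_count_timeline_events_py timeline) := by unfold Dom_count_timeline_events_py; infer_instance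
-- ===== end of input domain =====

-- B replaces A's three filtering scans by one counter-building pass plus a fixed-shape extraction (objective: simpler).

-- ===== PORT A =====
-- A: three generator-sum scans, one per event kind, then the literal result dict.
def count_timeline_events_py (timeline : List (List (String × String))) : List (String × Int) :=
  let started : Int := timeline.foldl (fun acc e => if (PySem.Dict.ofList e).get? "event" = some "node_start" then acc + 1 else acc) 0
  let finished : Int := timeline.foldl (fun acc e => if (PySem.Dict.ofList e).get? "event" = some "node_finish" then acc + 1 else acc) 0
  let failed : Int := timeline.foldl (fun acc e => if (PySem.Dict.ofList e).get? "event" = some "node_failed" then acc + 1 else acc) 0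
  [("nodes_started", started), ("nodes_finished", finished), ("nodes_failed", failed)]

-- ===== PORT B =====
-- B: one pass building counts[e.get("event")] += 1, then three lookups with default 0.
def count_timeline_events_py_alt (timeline : List (List (String × String))) : List (String × Int) :=
  let counts : PySem.Dict (Option String) Int :=
    timeline.foldl (fun d e =>
      let k := (PySem.Dict.ofList e).get? "event"
      d.insert k (d.getD k 0 + 1)) PySem.Dict.empty
  [("nodes_started", counts.getD (some "node_start") 0),
   ("nodes_finished", counts.getD (some "node_finish") 0),
   ("nodes_failed", counts.getD (some "node_failed") 0)]

-- ===== PRECONDITION & SPEC =====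
def Spec_count_timeline_events_py (timeline : List (List (String × String))) (out : List (String × Int)) : Prop := out = count_timeline_events_py_alt timeline
instance (timeline : List (List (String × String))) (out : List (String × Int)) : Decidable (Spec_count_timeline_events_py timeline out) := by unfold Spec_count_timeline_events_py; infer_instance

-- ===== CLAIM (what is proved, stated in full; the proofs are below) =====
def Claim_equal_count_timeline_events_py : Prop := ∀ (timeline : List (List (String × String))), Dom_count_timeline_events_py timeline → Spec_count_timeline_events_py timeline (count_timeline_events_py timeline)

-- ===== LEMMAS AND PROOFS =====

-- A's filtered-sum loop counts the occurrences of key k among the extracted event names.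
theorem foldl_count_event (f : List (String × String) → Option String) (k : Option String) :
    ∀ (l : List (List (String × String))) (acc : Int),
      l.foldl (fun acc e => if f e = k then acc + 1 else acc) acc
        = acc + ((l.map f).count k : Int) := by
  intro l
  induction l with
  | nil => intro acc; simp
  | cons e t ih =>
      intro acc
      simp only [List.foldl_cons, List.map_cons, List.count_cons, ih]
      by_cases h : f e = k
      · simp [h]; ring
      · simp [h]

-- B's counter pass, looked up at k, also yields that occurrence count.
theorem counter_getD_event (k : Option String) (l : List (List (String × String))) :
    (l.foldl (fun d e =>
        let kk := (PySem.Dict.ofList e).get? "event"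
        d.insert kk (d.getD kk 0 + 1)) (PySem.Dict.empty : PySem.Dict (Option String) Int)).getD k 0
      = ((l.map (fun e => (PySem.Dict.ofList e).get? "event")).count k : Int) := by
  have h := List.foldl_map (f := fun (e : List (String × String)) => (PySem.Dict.ofList e).get? "event")
      (g := fun (d : PySem.Dict (Option String) Int) x => d.insert x (d.getD x 0 + 1))
      (l := l) (init := (PySem.Dict.empty : PySem.Dict (Option String) Int))
  simp only [← h, PySem.Dict.getD_foldl_insert_add_one, PySem.Dict.getD_empty, zero_add]

-- ===== VERDICT (by name: the statement is the Claim_ definition above) =====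
theorem count_timeline_events_py_spec : Claim_equal_count_timeline_events_py := by
  intro timeline _
  unfold Spec_count_timeline_events_py count_timeline_events_py count_timeline_events_py_alt
  simp only [foldl_count_event, counter_getD_event, zero_add]
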